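-- pv_equiv track=rewrite | github.com/Burntt/Codeforces.com | Day4/D_LeftmostOnes.py | windowedones
-- ===== SOURCE A (Python) =====
-- from collections import deque
--
-- def windowedones(n, m, str):
--     first_ones = [-1] * (n - m + 1)
--     queue = deque()
--
--     # if windows size is greater than string
--     if n < m:
--         return [-1]
--
--     # add all locations of ones in first window to queue
--     for i in range(m):
--         if str[i] == '1':
--             queue.append(i)
--
--     # if there are ones in queue, set location of first one
--     # to first value in queue
--     # else there are no ones in the str, therefore impossible
--     if len(queue) > 0:
--         first_ones[0] = queue[0]
--     else:
--         first_ones[0] = -1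
--
--     # Loop through all possible windows of size m in the str
--     for i in range(1, n - m + 1):
--         # if the first character of this window equals one pop the index from the que
--         if str[i - 1] == '1':
--             queue.popleft()
--         # if the first character of the next window equals one add it to the que
--         if str[i + m - 1] == '1':
--             queue.append(i + m - 1)
--         # if the que has elements, the index corresponding to the first one in the window
--         # equals the first element in the que minus the current index of the string
--         if len(queue) > 0:
--             first_ones[i] = queue[0] - i
--     return first_ones
-- ===== SOURCE B (Python) =====
-- def windowedones(n, m, str):
--     if n < m:
--         return [-1]
--     # next_one[j] = smallest index k >= j with str[k] == '1', or n if none (among str[:n])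
--     next_one = [n] * (n + 1)
--     for j in range(n - 1, -1, -1):
--         next_one[j] = j if str[j] == '1' else next_one[j + 1]
--     result = [-1] * (n - m + 1)
--     for i in range(n - m + 1):
--         p = next_one[i]
--         if p <= i + m - 1:
--             result[i] = p - i
--     return result
-- ===== Notes on version B (the rewrite author's own statement) =====
-- stated objective: alternative
-- what changed: Replaces the incremental sliding-window deque of one-positions with a right-to-left precomputed next-one suffix table plus one independent pass over the window starts.
-- outside the precondition, e.g. on windowedones(2, 0, '00'): A returns [-1, -1, -1], B returns [-1, -1, -1]; on windowedones(1, -1, '0000'): A returns [-1, -1, -1], B raises IndexError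
import Mathlib
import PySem

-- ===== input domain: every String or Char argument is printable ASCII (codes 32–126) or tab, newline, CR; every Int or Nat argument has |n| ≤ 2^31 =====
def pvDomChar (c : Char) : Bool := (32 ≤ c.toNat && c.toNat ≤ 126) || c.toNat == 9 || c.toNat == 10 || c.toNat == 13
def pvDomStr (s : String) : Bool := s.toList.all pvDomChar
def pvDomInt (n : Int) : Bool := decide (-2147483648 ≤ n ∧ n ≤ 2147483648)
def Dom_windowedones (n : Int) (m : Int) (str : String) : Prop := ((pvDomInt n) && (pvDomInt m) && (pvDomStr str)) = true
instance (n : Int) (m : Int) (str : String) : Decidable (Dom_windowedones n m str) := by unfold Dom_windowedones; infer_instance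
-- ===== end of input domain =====

-- B replaces A's incremental sliding-window deque with a precomputed next-one suffix table (alternative algorithm, same cost).

-- ===== PORT A =====
-- the loop body of A's main 'for i in range(1, n-m+1)' loop
def pvStepA (str : String) (m : Int) (st : List Int × List Int) (i : Int) : List Int × List Int :=
  let queue := if PySem.Str.pyGet? str (i - 1) = some '1' then st.2.tail else st.2
  let queue := if PySem.Str.pyGet? str (i + m - 1) = some '1' then queue ++ [i + m - 1] else queue
  let first := if queue.length > 0
               then PySem.List.pySetD st.1 i (PySem.List.pyGetD queue 0 0 - i)
               else st.1
  (first, queue)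

def windowedones (n : Int) (m : Int) (str : String) : List Int :=
  let first := List.replicate (n - m + 1).toNat (-1 : Int)
  let queue : List Int := []
  if n < m then [-1]
  else
    -- for i in range(m): if str[i] == '1': queue.append(i)
    let queue := (PySem.List.pyRange 0 m 1).foldl
      (fun q i => if PySem.Str.pyGet? str i = some '1' then q ++ [i] else q) queue
    -- first_ones[0] = queue[0] if queue else -1
    let first := if queue.length > 0 then PySem.List.pySetD first 0 (PySem.List.pyGetD queue 0 0)
                 else PySem.List.pySetD first 0 (-1)
    -- for i in range(1, n - m + 1): …
    let st := (PySem.List.pyRange 1 (n - m + 1) 1).foldl (pvStepA str m) (first, queue)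
    st.1

-- ===== PORT B =====
-- the loop body of B's right-to-left suffix-table loop
def pvStepN (str : String) (nx : List Int) (j : Int) : List Int :=
  PySem.List.pySetD nx j
    (if PySem.Str.pyGet? str j = some '1' then j else PySem.List.pyGetD nx (j + 1) 0)

def windowedones_alt (n : Int) (m : Int) (str : String) : List Int :=
  if n < m then [-1]
  else
    -- next_one = [n] * (n + 1); for j in range(n-1, -1, -1): next_one[j] = j if str[j]=='1' else next_one[j+1]
    let next := List.replicate (n + 1).toNat n
    let next := (PySem.List.pyRange (n - 1) (-1) (-1)).foldl (pvStepN str) next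
    -- result = [-1]*(n-m+1); for i in range(n-m+1): p = next_one[i]; if p <= i+m-1: result[i] = p - i
    let result := List.replicate (n - m + 1).toNat (-1 : Int)
    (PySem.List.pyRange 0 (n - m + 1) 1).foldl
      (fun res i =>
        let p := PySem.List.pyGetD next i 0
        if p ≤ i + m - 1 then PySem.List.pySetD res i (p - i) else res) result

-- ===== PRECONDITION & SPEC =====
-- Pre_ excludes m ≤ 0 with m ≤ n (zero/negative window sizes: A wraps around with negative
-- indices or pops an empty deque there) and n > len(str) (where A raises IndexError).
def Pre_windowedones (n : Int) (m : Int) (str : String) : Prop :=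
  n < m ∨ (1 ≤ m ∧ m ≤ n ∧ n ≤ PySem.Str.len str)
instance (n : Int) (m : Int) (str : String) : Decidable (Pre_windowedones n m str) := by
  unfold Pre_windowedones; infer_instance
def pvWitness_windowedones : Int × Int × String := (3, 2, "010")

def Spec_windowedones (n : Int) (m : Int) (str : String) (out : List Int) : Prop := out = windowedones_alt n m str
instance (n : Int) (m : Int) (str : String) (out : List Int) : Decidable (Spec_windowedones n m str out) := by unfold Spec_windowedones; infer_instance

-- ===== CLAIM (what is proved, stated in full; the proofs are below) =====
def Claim_equal_windowedones : Prop := ∀ (n : Int) (m : Int) (str : String), Dom_windowedones n m str → Pre_windowedones n m str → Spec_windowedones n m str (windowedones n m str)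

-- ===== LEMMAS AND PROOFS =====

-- pure "set at index i if condition" loop step
def pvStep (c : Int → Prop) [DecidablePred c] (v : Int → Int) (res : List Int) (i : Int) : List Int :=
  if c i then res.set i.toNat (v i) else res

theorem pv_setfold_getElem? (c : Int → Prop) [DecidablePred c] (v : Int → Int) (b : Int) :
    ∀ (a : Int) (init : List Int), 0 ≤ a → b ≤ (init.length : Int) →
    ∀ (t : Nat), ((PySem.List.pyRange a b 1).foldl (pvStep c v) init)[t]? =
      if a ≤ (t : Int) ∧ (t : Int) < b ∧ c t then some (v t) else init[t]? := by
  intro a init ha hb t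
  by_cases hab : b ≤ a
  · rw [PySem.List.pyRange_one_eq_nil hab]
    simp only [List.foldl_nil]
    rw [if_neg]; omega
  · replace hab : a < b := by omega
    have : (b - a).toNat = (b - (a+1)).toNat + 1 := by omega
    rw [PySem.List.pyRange_one_cons hab]
    simp only [List.foldl_cons]
    have hlen' : b ≤ ((pvStep c v init a).length : Int) := by
      unfold pvStep; split_ifs <;> simp [hb]
    have ih := pv_setfold_getElem? c v b (a + 1) (pvStep c v init a) (by omega) hlen' t
    rw [ih]
    unfold pvStep
    by_cases hca : c a
    · rw [if_pos hca]
      by_cases hta : (t : Int) = a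
      · have ht : t = a.toNat := by omega
        subst ht
        rw [if_neg (by omega), if_pos (by exact ⟨by omega, by omega, by rwa [show ((a.toNat : Int)) = a by omega]⟩)]
        rw [List.getElem?_set_self' ]
        have : a.toNat < init.length := by omega
        simp [this, show ((a.toNat : Int)) = a by omega]
      · rw [List.getElem?_set_ne (by omega)]
        by_cases h1 : a + 1 ≤ (t : Int) ∧ (t : Int) < b ∧ c ↑t
        · rw [if_pos h1, if_pos ⟨by omega, h1.2⟩]
        · rw [if_neg h1, if_neg (by intro h2; exact h1 ⟨by omega, h2.2⟩)]
    · rw [if_neg hca]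
      by_cases h1 : a + 1 ≤ (t : Int) ∧ (t : Int) < b ∧ c ↑t
      · rw [if_pos h1, if_pos ⟨by omega, h1.2⟩]
      · rw [if_neg h1, if_neg]
        intro h2
        rcases h2 with ⟨h2a, h2b, h2c⟩
        by_cases hta : (t : Int) = a
        · exact absurd (hta ▸ h2c) hca
        · exact h1 ⟨by omega, h2b, h2c⟩
termination_by a => (b - a).toNat
decreasing_by omega


-- the character test used by both ports
def pvOne (str : String) (j : Int) : Bool := decide (PySem.Str.pyGet? str j = some '1')

-- the ones inside window [i, i+m)
def pvWin (str : String) (m i : Int) : List Int :=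
  (PySem.List.pyRange i (i + m) 1).filter (pvOne str)

-- first one at index ≥ i (sentinel n)
def pvNxt (str : String) (n i : Int) : Int :=
  ((PySem.List.pyRange i n 1).filter (pvOne str)).headD n


theorem pv_nxt_step (str : String) (n i : Int) (h : i < n) :
    pvNxt str n i = if pvOne str i then i else pvNxt str n (i + 1) := by
  unfold pvNxt
  rw [PySem.List.pyRange_one_cons h, List.filter_cons]
  by_cases hc : pvOne str i
  · simp [hc]
  · simp [hc]

theorem pv_bridge (str : String) (n m i : Int) (hm : 1 ≤ m) (_hi : 0 ≤ i) (hin : i + m ≤ n) :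
    (pvWin str m i ≠ [] ↔ pvNxt str n i ≤ i + m - 1) ∧
    (pvWin str m i ≠ [] → (pvWin str m i).headD 0 = pvNxt str n i) := by
  have hsplit : PySem.List.pyRange i n 1 =
      PySem.List.pyRange i (i + m) 1 ++ PySem.List.pyRange (i + m) n 1 :=
    PySem.List.pyRange_one_append i (i + m) n (by omega) hin
  have hnxt : pvNxt str n i = (pvWin str m i ++ (PySem.List.pyRange (i + m) n 1).filter (pvOne str)).headD n := by
    unfold pvNxt pvWin
    rw [hsplit, List.filter_append]
  rcases hw : pvWin str m i with _ | ⟨h0, tl⟩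
  · have hgt : ¬ pvNxt str n i ≤ i + m - 1 := by
      rw [hnxt, hw]
      simp only [List.nil_append]
      rcases hf : (PySem.List.pyRange (i + m) n 1).filter (pvOne str) with _ | ⟨r0, rtl⟩
      · simp; omega
      · have hr : r0 ∈ (PySem.List.pyRange (i + m) n 1).filter (pvOne str) := by
          rw [hf]; exact List.mem_cons_self
        have hr2 := List.mem_of_mem_filter hr
        rw [PySem.List.mem_pyRange_one] at hr2
        simp only [List.headD_cons]
        omega
    exact ⟨⟨fun hne => absurd rfl hne, fun hle => absurd hle hgt⟩, fun hne => absurd rfl hne⟩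
  · have hh : h0 ∈ PySem.List.pyRange i (i + m) 1 := by
      have : h0 ∈ pvWin str m i := by rw [hw]; exact List.mem_cons_self
      exact List.mem_of_mem_filter this
    rw [PySem.List.mem_pyRange_one] at hh
    refine ⟨⟨fun _ => ?_, fun _ => by simp⟩, fun _ => ?_⟩
    · rw [hnxt, hw]
      simp only [List.cons_append, List.headD_cons]
      omega
    · rw [hnxt, hw]
      simp

theorem pv_next_table (str : String) (n : Int) (hn : 0 ≤ n) :
    ∀ (a : Int) (nx : List Int), -1 ≤ a → a ≤ n - 1 → nx.length = (n + 1).toNat →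
    (∀ t : Int, a + 1 ≤ t → t ≤ n → PySem.List.pyGetD nx t 0 = pvNxt str n t) →
    ∀ t : Int, 0 ≤ t → t ≤ n →
      PySem.List.pyGetD ((PySem.List.pyRange a (-1) (-1)).foldl (pvStepN str) nx) t 0 = pvNxt str n t := by
  intro a nx ha1 ha2 hlen hinv t ht0 htn
  by_cases ha : a ≤ -1
  · rw [PySem.List.pyRange_neg_one_eq_nil ha]
    exact hinv t (by omega) htn
  · replace ha : (0:Int) ≤ a := by omega
    rw [PySem.List.pyRange_neg_one_cons (show (-1:Int) < a by omega)]
    simp only [List.foldl_cons]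
    have hval : pvStepN str nx a = nx.set a.toNat (if pvOne str a then a else pvNxt str n (a + 1)) := by
      unfold pvStepN
      rw [PySem.List.pySetD_of_nonneg _ _ ha]
      congr 1
      rw [hinv (a + 1) (by omega) (by omega)]
      unfold pvOne
      split_ifs with h1 h2 h3 <;> simp_all
    have hlen' : (pvStepN str nx a).length = (n + 1).toNat := by rw [hval]; simp [hlen]
    have hinv' : ∀ s : Int, a ≤ s → s ≤ n → PySem.List.pyGetD (pvStepN str nx a) s 0 = pvNxt str n s := by
      intro s hs1 hs2
      rw [hval, PySem.List.pyGetD_eq_getElem _ 0 (by omega) (by simp only [List.length_set]; omega)]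
      by_cases hsa : s = a
      · subst hsa
        rw [List.getElem_set_self (by simp only [List.length_set]; omega)]
        rw [pv_nxt_step str n s (by omega)]
      · rw [List.getElem_set_ne (by omega)]
        have hs := hinv s (by omega) hs2
        rw [PySem.List.pyGetD_eq_getElem nx 0 (by omega) (by rw [hlen]; omega)] at hs
        exact hs
    exact pv_next_table str n hn (a - 1) (pvStepN str nx a) (by omega) (by omega) hlen'
      (by intro s hs1 hs2; exact hinv' s (by omega) hs2) t ht0 htn
termination_by a => (a + 1).toNat
decreasing_by omega


theorem pv_q1 (str : String) (m i : Int) (hm : 1 ≤ m) :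
    (if PySem.Str.pyGet? str (i - 1) = some '1' then (pvWin str m (i - 1)).tail else pvWin str m (i - 1))
      = (PySem.List.pyRange i (i + m - 1) 1).filter (pvOne str) := by
  unfold pvWin
  rw [PySem.List.pyRange_one_cons (show i - 1 < i - 1 + m by omega), List.filter_cons]
  rw [show i - 1 + 1 = i by ring, show i - 1 + m = i + m - 1 by ring]
  by_cases hc : PySem.Str.pyGet? str (i - 1) = some '1'
  · rw [if_pos hc, if_pos (show pvOne str (i - 1) = true by simpa [pvOne, PySem.Str.pyGet?] using hc), List.tail_cons]
  · rw [if_neg hc, if_neg (show ¬ pvOne str (i - 1) = true by simpa [pvOne, PySem.Str.pyGet?] using hc)]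

theorem pv_q2 (str : String) (m i : Int) (hm : 1 ≤ m) :
    (if PySem.Str.pyGet? str (i + m - 1) = some '1'
       then ((PySem.List.pyRange i (i + m - 1) 1).filter (pvOne str)) ++ [i + m - 1]
       else (PySem.List.pyRange i (i + m - 1) 1).filter (pvOne str))
      = pvWin str m i := by
  unfold pvWin
  have hsp : PySem.List.pyRange i (i + m) 1 = PySem.List.pyRange i (i + m - 1) 1 ++ [i + m - 1] := by
    have h := PySem.List.pyRange_one_succ_right (a := i) (b := i + m - 1) (by omega)
    rw [show i + m - 1 + 1 = i + m by ring] at h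
    exact h
  rw [hsp, List.filter_append, List.filter_cons]
  by_cases hc : PySem.Str.pyGet? str (i + m - 1) = some '1'
  · rw [if_pos hc, if_pos (show pvOne str (i + m - 1) = true by simpa [pvOne, PySem.Str.pyGet?] using hc)]
    simp
  · rw [if_neg hc, if_neg (show ¬ pvOne str (i + m - 1) = true by simpa [pvOne, PySem.Str.pyGet?] using hc)]
    simp

theorem pv_loopA (str : String) (m : Int) (hm : 1 ≤ m) :
    ∀ (k : Nat) (first : List Int),
    (PySem.List.pyRange 1 ((k : Int) + 1) 1).foldl (pvStepA str m) (first, pvWin str m 0) =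
      ((PySem.List.pyRange 1 ((k : Int) + 1) 1).foldl
        (pvStep (fun i => pvWin str m i ≠ []) (fun i => (pvWin str m i).headD 0 - i)) first,
       pvWin str m (k : Int)) := by
  intro k
  induction k with
  | zero =>
    intro first
    rw [PySem.List.pyRange_one_eq_nil (by omega)]
    simp
  | succ k ih =>
    intro first
    have hsplit : PySem.List.pyRange 1 ((k : Int) + 1 + 1) 1
        = PySem.List.pyRange 1 ((k : Int) + 1) 1 ++ [(k : Int) + 1] :=
      PySem.List.pyRange_one_succ_right (by omega)
    rw [show ((k + 1 : Nat) : Int) = ((k : Int) + 1) from by push_cast; ring, hsplit]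
    rw [List.foldl_append, List.foldl_append, ih first]
    simp only [List.foldl_cons, List.foldl_nil]
    have hq1 := pv_q1 str m ((k : Int) + 1) hm
    rw [show (k : Int) + 1 - 1 = (k : Int) by ring] at hq1
    have hq2 := pv_q2 str m ((k : Int) + 1) hm
    unfold pvStepA
    simp only []
    rw [show (k : Int) + 1 - 1 = (k : Int) by ring]
    rw [hq1, hq2]
    unfold pvStep
    by_cases hne : pvWin str m ((k : Int) + 1) = []
    · simp [hne]
    · rcases hw : pvWin str m ((k : Int) + 1) with _ | ⟨h0, tl⟩
      · exact absurd hw hne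
      · simp only [hw, List.length_cons, List.headD_cons]
        rw [if_pos (by omega), if_pos (by simp)]
        rw [PySem.List.pySetD_of_nonneg _ _ (by omega)]
        congr 2
        rw [PySem.List.pyGetD_zero]
        rfl

theorem pv_init_queue (str : String) (m : Int) :
    (PySem.List.pyRange 0 m 1).foldl
      (fun q i => if PySem.Str.pyGet? str i = some '1' then q ++ [i] else q) [] = pvWin str m 0 := by
  have h := PySem.List.foldl_append_ite (fun i => PySem.Str.pyGet? str i = some '1')
      (fun i : Int => i) (PySem.List.pyRange 0 m 1) []
  simp only [List.nil_append] at h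
  rw [h]
  unfold pvWin pvOne
  rw [show (0 : Int) + m = m by ring]
  simp



theorem pv_A_getElem (n m : Int) (str : String) (hm : 1 ≤ m) (hmn : m ≤ n) (t : Nat) :
    (windowedones n m str)[t]? =
      if 1 ≤ (t : Int) ∧ (t : Int) < n - m + 1 ∧ pvWin str m (t : Int) ≠ [] then
        some ((pvWin str m (t : Int)).headD 0 - (t : Int))
      else if t = 0 then some (if pvWin str m 0 ≠ [] then (pvWin str m 0).headD 0 else -1)
      else (List.replicate (n - m + 1).toNat (-1 : Int))[t]? := by
  have hnm : ¬ n < m := by omega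
  unfold windowedones
  simp only [if_neg hnm, pv_init_queue]
  set first0 := (if (pvWin str m 0).length > 0
      then PySem.List.pySetD (List.replicate (n - m + 1).toNat (-1 : Int)) 0 (PySem.List.pyGetD (pvWin str m 0) 0 0)
      else PySem.List.pySetD (List.replicate (n - m + 1).toNat (-1 : Int)) 0 (-1)) with hf0
  have hfirst0 : first0 = (List.replicate (n - m + 1).toNat (-1 : Int)).set 0
      (if pvWin str m 0 ≠ [] then (pvWin str m 0).headD 0 else -1) := by
    rw [hf0]
    rcases hw : pvWin str m 0 with _ | ⟨h0, tl⟩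
    · simp [PySem.List.pySetD_of_nonneg _ _ (le_refl (0 : Int))]
    · rw [if_pos (by simp), if_pos (by simp)]
      rw [PySem.List.pySetD_of_nonneg _ _ (le_refl (0 : Int)), PySem.List.pyGetD_zero]
      rfl
  have hK : n - m + 1 = ((n - m).toNat : Int) + 1 := by omega
  rw [hK, pv_loopA str m hm (n - m).toNat first0]
  simp only []
  have hb : ((n - m).toNat : Int) + 1 ≤ (first0.length : Int) := by
    rw [hfirst0]
    simp only [List.length_set, List.length_replicate]
    omega
  rw [pv_setfold_getElem? _ _ (((n - m).toNat : Int) + 1) 1 first0 (by omega) hb t]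
  by_cases hC : 1 ≤ (t : Int) ∧ (t : Int) < ((n - m).toNat : Int) + 1 ∧ pvWin str m (t : Int) ≠ []
  · rw [if_pos hC, if_pos hC]
  · rw [if_neg hC, if_neg hC, hfirst0]
    by_cases ht0 : t = 0
    · subst ht0
      rw [if_pos rfl]
      rw [List.getElem?_set_self']
      rw [List.getElem?_replicate_of_lt (by omega)]
      rfl
    · rw [if_neg ht0, List.getElem?_set_ne (by omega), hK]

theorem pv_B_getElem (n m : Int) (str : String) (hm : 1 ≤ m) (hmn : m ≤ n) (t : Nat) :
    (windowedones_alt n m str)[t]? =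
      if 0 ≤ (t : Int) ∧ (t : Int) < n - m + 1 ∧ pvNxt str n (t : Int) ≤ (t : Int) + m - 1 then
        some (pvNxt str n (t : Int) - (t : Int))
      else (List.replicate (n - m + 1).toNat (-1 : Int))[t]? := by
  have hnm : ¬ n < m := by omega
  unfold windowedones_alt
  simp only [if_neg hnm]
  set nxt := (PySem.List.pyRange (n - 1) (-1) (-1)).foldl (pvStepN str) (List.replicate (n + 1).toNat n) with hnx
  have hrepl : ∀ s : Int, (n - 1) + 1 ≤ s → s ≤ n →
      PySem.List.pyGetD (List.replicate (n + 1).toNat n) s 0 = pvNxt str n s := by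
    intro s h1 h2
    have hs : s = n := by omega
    rw [hs]
    rw [PySem.List.pyGetD_eq_getElem _ _ (by omega) (by simp only [List.length_replicate]; omega)]
    rw [List.getElem_replicate]
    unfold pvNxt
    rw [PySem.List.pyRange_one_eq_nil (le_refl n)]
    rfl
  have hnext : ∀ s : Int, 0 ≤ s → s ≤ n → PySem.List.pyGetD nxt s 0 = pvNxt str n s := by
    intro s hs1 hs2
    exact pv_next_table str n (by omega) (n - 1) (List.replicate (n + 1).toNat n)
      (by omega) (by omega) (by simp only [List.length_replicate]) hrepl s hs1 hs2
  have hcongr := PySem.List.foldl_congr_mem' (PySem.List.pyRange 0 (n - m + 1) 1)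
      (fun res i => if PySem.List.pyGetD nxt i 0 ≤ i + m - 1
                    then PySem.List.pySetD res i (PySem.List.pyGetD nxt i 0 - i) else res)
      (pvStep (fun i => pvNxt str n i ≤ i + m - 1) (fun i => pvNxt str n i - i))
      (List.replicate (n - m + 1).toNat (-1 : Int))
      (by
        intro x hx acc
        rw [PySem.List.mem_pyRange_one] at hx
        simp only [hnext x hx.1 (by omega : x ≤ n)]
        unfold pvStep
        split_ifs with h
        · rw [PySem.List.pySetD_of_nonneg _ _ hx.1]
        · rfl)
  rw [hcongr]
  have hK : n - m + 1 = ((n - m).toNat : Int) + 1 := by omega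
  rw [hK]
  rw [pv_setfold_getElem? _ _ (((n - m).toNat : Int) + 1) 0 _ (le_refl 0)
      (by simp only [List.length_replicate]; omega) t]

-- ===== VERDICT (by name: the statement is the Claim_ definition above) =====
theorem windowedones_spec : Claim_equal_windowedones := by
  intro n m str _ hpre
  unfold Spec_windowedones
  by_cases hnm : n < m
  · unfold windowedones windowedones_alt
    rw [if_pos hnm, if_pos hnm]
  · obtain ⟨hm, hmn, -⟩ : 1 ≤ m ∧ m ≤ n ∧ n ≤ PySem.Str.len str := hpre.resolve_left hnm
    apply List.ext_getElem?
    intro t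
    rw [pv_A_getElem n m str hm hmn t, pv_B_getElem n m str hm hmn t]
    by_cases ht0 : t = 0
    · subst ht0
      simp only [Nat.cast_zero]
      have hbr := pv_bridge str n m 0 hm (le_refl 0) (by omega)
      rw [if_neg (fun h => absurd h.1 (by omega)), if_pos trivial]
      by_cases hw : pvWin str m 0 = []
      · have hw' : ¬ pvWin str m 0 ≠ [] := fun h => h hw
        rw [if_neg hw', if_neg (fun hC => hw' (hbr.1.mpr (by have := hC.2.2; omega)))]
        rw [List.getElem?_replicate_of_lt (by omega)]
      · have hw' : pvWin str m 0 ≠ [] := hw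
        rw [if_pos hw', if_pos ⟨le_refl 0, by omega, by have := hbr.1.mp hw'; omega⟩]
        rw [hbr.2 hw', sub_zero]
    · by_cases hC1 : 1 ≤ (t : Int) ∧ (t : Int) < n - m + 1 ∧ pvWin str m (t : Int) ≠ []
      · have hbr := pv_bridge str n m (t : Int) hm (by omega) (by omega)
        rw [if_pos hC1, if_pos ⟨by omega, hC1.2.1, hbr.1.mp hC1.2.2⟩]
        rw [hbr.2 hC1.2.2]
      · have hnC2 : ¬(0 ≤ (t : Int) ∧ (t : Int) < n - m + 1 ∧ pvNxt str n (t : Int) ≤ (t : Int) + m - 1) := by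
          intro hC2
          have hbr := pv_bridge str n m (t : Int) hm (by omega) (by omega)
          exact hC1 ⟨by omega, hC2.2.1, hbr.1.mpr hC2.2.2⟩
        rw [if_neg hC1, if_neg ht0, if_neg hnC2]
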